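-- pv_equiv track=rewrite | github.com/WitcherLeo/Knowing-how-Knowing-that | release/model/graph_match/tools/build_graph/attrs/build_taxonomy.py | contain_special_entity
-- ===== SOURCE A (Python) =====
-- def contain_special_entity(text, entities_human_labeled):
--     for item in entities_human_labeled:
--         if item in text:
--             index_of_item = text.index(item)
--             if index_of_item + len(item) == len(text):
--                 modifier = text[:index_of_item]
--                 return True, item, modifier
--
--     for item in entities_human_labeled:
--         if item in text:
--             index_of_item = text.index(item)
--             if index_of_item == 0:
--                 modifier = text[index_of_item + len(item):]
--                 return True, item, modifier
--
--     for item in entities_human_labeled: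
--         if item in text:
--             index_of_item = text.index(item)
--             modifier = text[index_of_item + len(item):]
--             return True, item, modifier
--     return False, '', ''
-- ===== SOURCE B (Python) =====
-- def contain_special_entity(text, entities_human_labeled):
--     # one pass: record the first suffix-, prefix- and substring-match candidates
--     suf = pre = sub = None
--     n = len(text)
--     for item in entities_human_labeled:
--         idx = text.find(item)
--         if idx < 0:
--             continue
--         end = idx + len(item)
--         if suf is None and end == n:
--             suf = (True, item, text[:idx])
--         if pre is None and idx == 0:
--             pre = (True, item, text[end:])
--         if sub is None:
--             sub = (True, item, text[end:])
--     return suf or pre or sub or (False, '', '')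
-- ===== Notes on version B (the rewrite author's own statement) =====
-- stated objective: alternative
-- what changed: Replaces A's three sequential full scans of entities_human_labeled (suffix, then prefix, then substring) by a single pass that records the first suffix, prefix and substring candidates and resolves the suffix>prefix>substring priority after the loop; uses str.find once per item instead of 'in' followed by str.index.
import Mathlib
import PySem

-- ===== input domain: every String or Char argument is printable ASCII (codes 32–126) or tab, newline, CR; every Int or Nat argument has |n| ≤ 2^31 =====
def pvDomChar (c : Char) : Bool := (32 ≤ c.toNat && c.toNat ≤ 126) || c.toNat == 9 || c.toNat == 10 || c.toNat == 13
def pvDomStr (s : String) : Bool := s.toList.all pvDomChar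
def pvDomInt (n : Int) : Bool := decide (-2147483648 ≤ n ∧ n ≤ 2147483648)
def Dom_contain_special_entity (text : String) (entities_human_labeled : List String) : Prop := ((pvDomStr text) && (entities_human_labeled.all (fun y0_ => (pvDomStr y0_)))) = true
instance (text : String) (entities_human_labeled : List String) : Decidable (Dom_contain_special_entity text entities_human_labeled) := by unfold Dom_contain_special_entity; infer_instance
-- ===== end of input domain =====

-- B merges A's three sequential scans of the entity list into a single pass that records the
-- first suffix/prefix/substring candidates (objective: alternative decomposition, one pass instead of three).


-- ===== PORT A =====
-- first loop of A: first item that is a suffix occurrence (first occurrence ends at len(text))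
def pvALoop1 (text : String) : List String → Option (Bool × String × String)
  | [] => none
  | item :: rest =>
    if PySem.Str.isIn item text then
      let index_of_item := PySem.Str.find text item   -- text.index(item); item ∈ text, so no raise
      if index_of_item + PySem.Str.len item = PySem.Str.len text then
        some (true, item, PySem.Str.slice text none (some index_of_item))
      else pvALoop1 text rest
    else pvALoop1 text rest

-- second loop of A: first item whose first occurrence is at index 0
def pvALoop2 (text : String) : List String → Option (Bool × String × String)
  | [] => none
  | item :: rest =>
    if PySem.Str.isIn item text then
      let index_of_item := PySem.Str.find text item
      if index_of_item = 0 then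
        some (true, item, PySem.Str.slice text (some (index_of_item + PySem.Str.len item)) none)
      else pvALoop2 text rest
    else pvALoop2 text rest

-- third loop of A: first item contained in text
def pvALoop3 (text : String) : List String → Option (Bool × String × String)
  | [] => none
  | item :: rest =>
    if PySem.Str.isIn item text then
      let index_of_item := PySem.Str.find text item
      some (true, item, PySem.Str.slice text (some (index_of_item + PySem.Str.len item)) none)
    else pvALoop3 text rest

def contain_special_entity (text : String) (entities_human_labeled : List String) : Bool × String × String :=
  match pvALoop1 text entities_human_labeled with
  | some r => r
  | none =>
    match pvALoop2 text entities_human_labeled with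
    | some r => r
    | none =>
      match pvALoop3 text entities_human_labeled with
      | some r => r
      | none => (false, "", "")

-- ===== PORT B =====
-- one pass over the list carrying the three candidates (suffix, prefix, substring)
def pvBLoop (text : String) : List String → Option (Bool × String × String) →
    Option (Bool × String × String) → Option (Bool × String × String) → Bool × String × String
  | [], suf, pre, sub => ((suf.or pre).or sub).getD (false, "", "")
  | item :: rest, suf, pre, sub =>
    let idx := PySem.Str.find text item
    if idx < 0 then pvBLoop text rest suf pre sub
    else
      let e := idx + PySem.Str.len item
      let suf' := if suf = none ∧ e = PySem.Str.len text then
          some (true, item, PySem.Str.slice text none (some idx)) else suf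
      let pre' := if pre = none ∧ idx = 0 then
          some (true, item, PySem.Str.slice text (some e) none) else pre
      let sub' := if sub = none then
          some (true, item, PySem.Str.slice text (some e) none) else sub
      pvBLoop text rest suf' pre' sub'

def contain_special_entity_alt (text : String) (entities_human_labeled : List String) : Bool × String × String :=
  pvBLoop text entities_human_labeled none none none

-- ===== PRECONDITION & SPEC =====
def Spec_contain_special_entity (text : String) (entities_human_labeled : List String) (out : Bool × String × String) : Prop := out = contain_special_entity_alt text entities_human_labeled
instance (text : String) (entities_human_labeled : List String) (out : Bool × String × String) : Decidable (Spec_contain_special_entity text entities_human_labeled out) := by unfold Spec_contain_special_entity; infer_instance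

-- ===== CLAIM (what is proved, stated in full; the proofs are below) =====
def Claim_equal_contain_special_entity : Prop := ∀ (text : String) (entities_human_labeled : List String), Dom_contain_special_entity text entities_human_labeled → Spec_contain_special_entity text entities_human_labeled (contain_special_entity text entities_human_labeled)

-- ===== LEMMAS AND PROOFS =====

theorem pv_isIn_iff_find_nonneg (text item : String) :
    PySem.Str.isIn item text = true ↔ 0 ≤ PySem.Str.find text item := by
  rw [PySem.Str.isIn_iff_infix, PySem.Str.find_nonneg_iff]

-- componentwise steps: updating one candidate then completing equals completing from the head
theorem pv_or_step {α : Type} (o : Option α) (c : Prop) [Decidable c] (v : α) (t : Option α) :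
    ((if o = none ∧ c then some v else o).or t) = o.or (if c then some v else t) := by
  cases o <;> split_ifs <;> simp_all

-- the single pass with partial candidates equals the three scans of A, each completed from the rest
theorem pvBLoop_eq (text : String) (l : List String)
    (suf pre sub : Option (Bool × String × String)) :
    pvBLoop text l suf pre sub =
      ((suf.or (pvALoop1 text l)).or
        ((pre.or (pvALoop2 text l)).or (sub.or (pvALoop3 text l)))).getD (false, "", "") := by
  induction l generalizing suf pre sub with
  | nil => simp [pvBLoop, pvALoop1, pvALoop2, pvALoop3]
  | cons item rest ih =>
    by_cases hin : PySem.Str.isIn item text = true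
    · have hge : ¬ (PySem.Str.find text item < 0) := by
        have := (pv_isIn_iff_find_nonneg text item).mp hin; omega
      simp only [pvBLoop, if_neg hge, ih, pvALoop1, pvALoop2, pvALoop3, hin, if_true]
      rw [pv_or_step, pv_or_step]
      have hsub : ∀ (o : Option (Bool × String × String)) (v : Bool × String × String) t,
          (if o = none then some v else o).or t = o.or (some v) := by
        intro o v t; cases o <;> simp
      rw [hsub]
    · have hlt : PySem.Str.find text item < 0 := by
        have h := (pv_isIn_iff_find_nonneg text item)
        by_contra h'; exact hin (h.mpr (by omega))
      simp only [pvBLoop, pvALoop1, pvALoop2, pvALoop3, hin, if_pos hlt, ih,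
        Bool.false_eq_true, if_false]

-- ===== VERDICT (by name: the statement is the Claim_ definition above) =====
theorem contain_special_entity_spec : Claim_equal_contain_special_entity := by
  intro text l _
  unfold Spec_contain_special_entity contain_special_entity contain_special_entity_alt
  rw [pvBLoop_eq]
  rcases h1 : pvALoop1 text l with _ | r1 <;>
    rcases h2 : pvALoop2 text l with _ | r2 <;>
      rcases h3 : pvALoop3 text l with _ | r3 <;> simp
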